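-- pv_equiv track=rewrite | github.com/pipehappy1/relaxrender | features/spatialDenoising/clear_noise.py | mid_of_rec
-- ===== SOURCE A (Python) =====
-- def mid_of_rec(pix, x, y, radius, w, h):
--     p = []
--
--     for i in range(x - radius, x + radius):
--         if i < 1 or i > w:
--             continue
--         for j in range(y - radius, y + radius):
--             if j <= 1 or j > h:
--                 continue
--             # 排除极值点
--             if pix[i, j] > 15 and pix[i, j] < 230:
--                 p.append(pix[i, j])
--
--     p.sort()
--     m = len(p) // 2
--     if m <= 0:
--         px = x + radius
--         py = y + radius
--         if px > w:
--             px = w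
--         if py > h:
--             py = h
--
--         return pix[px, py]
--     else:
--         return (p[m] + p[-m]) // 2
-- ===== SOURCE B (Python) =====
-- def mid_of_rec(pix, x, y, radius, w, h):
--     # Histogram-based selection: count filtered pixel values per value instead of
--     # collecting and sorting, then read both order statistics off one cumulative scan.
--     cnt = {}
--     n = 0
--     for i in range(x - radius, x + radius):
--         if i < 1 or i > w:
--             continue
--         for j in range(y - radius, y + radius):
--             if j <= 1 or j > h:
--                 continue
--             v = pix[i, j]
--             if 15 < v < 230:
--                 cnt[v] = cnt.get(v, 0) + 1
--                 n += 1
--     if n < 2: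
--         px = x + radius
--         py = y + radius
--         if px > w:
--             px = w
--         if py > h:
--             py = h
--         return pix[px, py]
--     m = n // 2
--     lo = None
--     hi = None
--     c = 0
--     for v in range(16, 230):
--         c += cnt.get(v, 0)
--         if lo is None and c > m:
--             lo = v
--         if hi is None and c > n - m:
--             hi = v
--     return (lo + hi) // 2
-- ===== Notes on version B (the rewrite author's own statement) =====
-- stated objective: alternative
-- what changed: Replaces collect-then-sort plus positional indexing with a dict histogram of the filtered pixel values and a single cumulative scan over the value range 16..229 that reads off both order statistics (index m and n-m), so no list is built and nothing is sorted.
import Mathlib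
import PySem

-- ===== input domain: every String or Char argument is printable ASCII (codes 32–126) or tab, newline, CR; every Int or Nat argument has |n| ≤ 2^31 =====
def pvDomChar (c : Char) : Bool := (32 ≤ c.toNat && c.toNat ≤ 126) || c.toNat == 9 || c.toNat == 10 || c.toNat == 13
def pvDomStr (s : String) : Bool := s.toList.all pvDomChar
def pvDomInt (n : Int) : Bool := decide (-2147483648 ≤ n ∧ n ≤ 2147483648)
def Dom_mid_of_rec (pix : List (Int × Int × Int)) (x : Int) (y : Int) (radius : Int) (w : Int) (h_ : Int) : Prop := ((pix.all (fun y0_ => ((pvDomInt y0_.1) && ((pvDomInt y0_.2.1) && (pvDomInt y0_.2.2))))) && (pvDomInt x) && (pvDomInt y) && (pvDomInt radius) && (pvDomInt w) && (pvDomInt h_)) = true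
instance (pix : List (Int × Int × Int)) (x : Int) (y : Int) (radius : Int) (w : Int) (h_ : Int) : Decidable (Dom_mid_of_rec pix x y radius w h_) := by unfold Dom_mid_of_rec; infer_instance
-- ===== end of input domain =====

set_option maxRecDepth 4000

-- B replaces A's collect-then-sort-then-index with a dict histogram of the filtered
-- window values plus one cumulative scan over 16..229 that reads off both order
-- statistics; equivalence is proved on every input where the Python A raises no KeyError.

-- pix[i, j]: first-match lookup of the key (i, j) in the association list (none = KeyError)
def pixGet? : List (Int × Int × Int) → Int → Int → Option Int
  | [], _, _ => none
  | t :: rest, i, j => if t.1 = i ∧ t.2.1 = j then some t.2.2 else pixGet? rest i j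

-- ===== PORT A =====
def mid_of_rec (pix : List (Int × Int × Int)) (x : Int) (y : Int) (radius : Int) (w : Int) (h_ : Int) : Int :=
  let p : List Int :=
    (PySem.List.pyRange (x - radius) (x + radius) 1).foldl (fun acc i =>
      if i < 1 ∨ i > w then acc
      else (PySem.List.pyRange (y - radius) (y + radius) 1).foldl (fun acc j =>
        if j ≤ 1 ∨ j > h_ then acc
        else if 15 < (pixGet? pix i j).getD 0 ∧ (pixGet? pix i j).getD 0 < 230 then
          acc ++ [(pixGet? pix i j).getD 0]
        else acc) acc) []
  let ps := PySem.List.sorted p (fun v => v) false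
  let m : Int := PySem.Int.floordiv (ps.length : Int) 2
  if m ≤ 0 then
    let px := x + radius
    let py := y + radius
    let px := if px > w then w else px
    let py := if py > h_ then h_ else py
    (pixGet? pix px py).getD 0
  else
    PySem.Int.floordiv (PySem.List.pyGetD ps m 0 + PySem.List.pyGetD ps (-m) 0) 2

-- ===== PORT B =====
def mid_of_rec_alt (pix : List (Int × Int × Int)) (x : Int) (y : Int) (radius : Int) (w : Int) (h_ : Int) : Int :=
  let st : PySem.Dict Int Int × Int :=
    (PySem.List.pyRange (x - radius) (x + radius) 1).foldl (fun st i =>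
      if i < 1 ∨ i > w then st
      else (PySem.List.pyRange (y - radius) (y + radius) 1).foldl (fun st j =>
        if j ≤ 1 ∨ j > h_ then st
        else
          let v := (pixGet? pix i j).getD 0
          if 15 < v ∧ v < 230 then (st.1.modify v 0 (· + 1), st.2 + 1) else st) st)
      (PySem.Dict.empty, 0)
  let cnt := st.1
  let n : Int := st.2
  if n < 2 then
    let px := x + radius
    let py := y + radius
    let px := if px > w then w else px
    let py := if py > h_ then h_ else py
    (pixGet? pix px py).getD 0
  else
    let m : Int := PySem.Int.floordiv n 2
    let r : Int × Option Int × Option Int :=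
      (PySem.List.pyRange 16 230 1).foldl (fun s v =>
        let c := s.1 + cnt.getD v 0
        let lo := if s.2.1 = none ∧ c > m then some v else s.2.1
        let hi := if s.2.2 = none ∧ c > n - m then some v else s.2.2
        (c, lo, hi)) (0, none, none)
    PySem.Int.floordiv (r.2.1.getD 0 + r.2.2.getD 0) 2

-- ===== PRECONDITION & SPEC =====
-- Pre_ excludes exactly the inputs on which the Python A raises KeyError: some in-bounds
-- window key is missing from pix (stated as: the count of distinct pix keys inside the
-- clipped window equals the window's area), or — when fewer than two filtered values are
-- found, A's fallback case — the clamped fallback key is missing.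
def Pre_mid_of_rec (pix : List (Int × Int × Int)) (x : Int) (y : Int) (radius : Int) (w : Int) (h_ : Int) : Prop :=
  ((PySem.List.dedup (pix.map (fun t => (t.1, t.2.1)))).filter
      (fun k => decide (max (x - radius) 1 ≤ k.1 ∧ k.1 < min (x + radius) (w + 1) ∧
                        max (y - radius) 2 ≤ k.2 ∧ k.2 < min (y + radius) (h_ + 1)))).length
    = (min (x + radius) (w + 1) - max (x - radius) 1).toNat *
      (min (y + radius) (h_ + 1) - max (y - radius) 2).toNat
  ∧ (((PySem.List.dedup (pix.map (fun t => (t.1, t.2.1)))).filter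
      (fun k => decide (max (x - radius) 1 ≤ k.1 ∧ k.1 < min (x + radius) (w + 1) ∧
                        max (y - radius) 2 ≤ k.2 ∧ k.2 < min (y + radius) (h_ + 1)) &&
        ((pix.find? (fun t => decide (t.1 = k.1 ∧ t.2.1 = k.2))).map
          (fun t => decide (15 < t.2.2 ∧ t.2.2 < 230))).getD false)).length < 2 →
     ∃ t ∈ pix, t.1 = (if x + radius > w then w else x + radius) ∧
                t.2.1 = (if y + radius > h_ then h_ else y + radius))
instance (pix : List (Int × Int × Int)) (x : Int) (y : Int) (radius : Int) (w : Int) (h_ : Int) : Decidable (Pre_mid_of_rec pix x y radius w h_) := by unfold Pre_mid_of_rec; infer_instance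

def pvWitness_mid_of_rec : (List (Int × Int × Int)) × Int × Int × Int × Int × Int := ([(0, 0, 7)], 0, 0, 0, 5, 5)

def Spec_mid_of_rec (pix : List (Int × Int × Int)) (x : Int) (y : Int) (radius : Int) (w : Int) (h_ : Int) (out : Int) : Prop := out = mid_of_rec_alt pix x y radius w h_
instance (pix : List (Int × Int × Int)) (x : Int) (y : Int) (radius : Int) (w : Int) (h_ : Int) (out : Int) : Decidable (Spec_mid_of_rec pix x y radius w h_ out) := by unfold Spec_mid_of_rec; infer_instance

-- ===== CLAIM (what is proved, stated in full; the proofs are below) =====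
def Claim_equal_mid_of_rec : Prop := ∀ (pix : List (Int × Int × Int)) (x : Int) (y : Int) (radius : Int) (w : Int) (h_ : Int), Dom_mid_of_rec pix x y radius w h_ → Pre_mid_of_rec pix x y radius w h_ → Spec_mid_of_rec pix x y radius w h_ (mid_of_rec pix x y radius w h_)

-- ===== LEMMAS AND PROOFS =====

-- declarative description of the filtered window values (used by Pre_ and the proofs)
def winList (pix : List (Int × Int × Int)) (x : Int) (y : Int) (radius : Int) (w : Int) (h_ : Int) : List Int :=
  (PySem.List.pyRange (x - radius) (x + radius) 1).flatMap (fun i =>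
    if i < 1 ∨ i > w then []
    else (PySem.List.pyRange (y - radius) (y + radius) 1).flatMap (fun j =>
      if j ≤ 1 ∨ j > h_ then []
      else match pixGet? pix i j with
        | some v => if 15 < v ∧ v < 230 then [v] else []
        | none => []))


theorem pvWitness_ok : Dom_mid_of_rec pvWitness_mid_of_rec.1 pvWitness_mid_of_rec.2.1 pvWitness_mid_of_rec.2.2.1 pvWitness_mid_of_rec.2.2.2.1 pvWitness_mid_of_rec.2.2.2.2.1 pvWitness_mid_of_rec.2.2.2.2.2 ∧ Pre_mid_of_rec pvWitness_mid_of_rec.1 pvWitness_mid_of_rec.2.1 pvWitness_mid_of_rec.2.2.1 pvWitness_mid_of_rec.2.2.2.1 pvWitness_mid_of_rec.2.2.2.2.1 pvWitness_mid_of_rec.2.2.2.2.2 := by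
  decide


theorem countP_lt_add_count (s : List Int) (a : Int) :
    s.countP (fun e => decide (e < a + 1)) = s.countP (fun e => decide (e < a)) + s.count a := by
  induction s with
  | nil => simp
  | cons x t ih =>
    simp only [List.countP_cons, List.count_cons, ih]
    by_cases hx : x = a
    · subst hx; simp; omega
    · simp [hx]
      split_ifs with h1 h2 h2 <;> omega

theorem sorted_getElem_le (s : List Int) (hs : List.Pairwise (· ≤ ·) s) (k : Nat) (hk : k < s.length) (a : Int)
    (h : k + 1 ≤ s.countP (fun e => decide (e ≤ a))) : s[k] ≤ a := by
  by_contra hgt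
  push Not at hgt
  have hsplit : s = s.take k ++ s.drop k := (List.take_append_drop k s).symm
  have hdrop : (s.drop k).countP (fun e => decide (e ≤ a)) = 0 := by
    rw [List.countP_eq_zero]
    intro e he
    rw [List.mem_iff_getElem] at he
    obtain ⟨i, hi, rfl⟩ := he
    have hlen : k + i < s.length := by
      have := hi; simp [List.length_drop] at this; omega
    have hdi : (s.drop k)[i] = s[k + i]'hlen := List.getElem_drop ..
    have hmono : s[k] ≤ (s.drop k)[i] := by
      rw [hdi]
      rcases Nat.eq_zero_or_pos i with h0 | h0
      · subst h0; simp
      · exact (List.pairwise_iff_getElem.mp hs) k (k + i) hk hlen (by omega)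
    simp only [decide_eq_true_eq]
    omega
  have := congrArg (List.countP (fun e => decide (e ≤ a))) hsplit
  rw [List.countP_append, hdrop] at this
  have hle : (s.take k).countP (fun e => decide (e ≤ a)) ≤ k := by
    calc _ ≤ (s.take k).length := List.countP_le_length
    _ ≤ k := by simp
  omega

theorem le_countP_of_sorted_getElem (s : List Int) (hs : List.Pairwise (· ≤ ·) s) (k : Nat) (hk : k < s.length) (a : Int)
    (h : s[k] ≤ a) : k + 1 ≤ s.countP (fun e => decide (e ≤ a)) := by
  have hsplit : s = s.take (k + 1) ++ s.drop (k + 1) := (List.take_append_drop (k + 1) s).symm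
  have htake : (s.take (k + 1)).countP (fun e => decide (e ≤ a)) = k + 1 := by
    rw [List.countP_eq_length.mpr, List.length_take]
    · omega
    · intro e he
      rw [List.mem_iff_getElem] at he
      obtain ⟨i, hi, rfl⟩ := he
      have hi' : i < k + 1 := by
        have := List.length_take_le (k+1) s; omega
      have : (s.take (k + 1))[i] = s[i]'(by omega) := List.getElem_take
      rw [this]
      rcases Nat.lt_or_ge i k with h0 | h0
      · have := (List.pairwise_iff_getElem.mp hs) i k (by omega) hk h0
        simpa using le_trans this h
      · have : i = k := by omega
        subst this; simpa using h
  have := congrArg (List.countP (fun e => decide (e ≤ a))) hsplit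
  rw [List.countP_append, htake] at this
  omega

theorem countP_lt_succ_eq_le (s : List Int) (a : Int) :
    s.countP (fun e => decide (e < a + 1)) = s.countP (fun e => decide (e ≤ a)) := by
  apply List.countP_congr
  intro e _
  simp

theorem slot_step (s : List Int) (hs : List.Pairwise (· ≤ ·) s) (k : Nat) (hk : k < s.length)
    (a c : Int) (o : Option Int)
    (hc : c = (s.countP (fun e => decide (e < a)) : Int))
    (ho : o = some s[k] ∨ (o = none ∧ c ≤ (k : Int) ∧ a ≤ s[k])) :
    (if o = none ∧ c + (s.count a : Int) > (k : Int) then some a else o) = some s[k] ∨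
      ((if o = none ∧ c + (s.count a : Int) > (k : Int) then some a else o) = none ∧
        c + (s.count a : Int) ≤ (k : Int) ∧ a + 1 ≤ s[k]) := by
  have hc' : c + (s.count a : Int) = (s.countP (fun e => decide (e ≤ a)) : Int) := by
    rw [hc, ← countP_lt_succ_eq_le, countP_lt_add_count]; push_cast; ring
  rcases ho with ho | ⟨ho, hck, has⟩
  · left; simp [ho]
  · subst ho
    by_cases hgt : c + (s.count a : Int) > (k : Int)
    · left
      have hcount : k + 1 ≤ s.countP (fun e => decide (e ≤ a)) := by omega
      have hle : s[k] ≤ a := sorted_getElem_le s hs k hk a hcount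
      have : s[k] = a := le_antisymm hle has
      simp [hgt, this]
    · right
      refine ⟨by simp [hgt], by omega, ?_⟩
      by_contra hcon
      have hka : s[k] ≤ a := by omega
      have := le_countP_of_sorted_getElem s hs k hk a hka
      omega

theorem scan_inv (s : List Int) (hs : List.Pairwise (· ≤ ·) s) (k1 k2 : Nat)
    (hk1 : k1 < s.length) (hk2 : k2 < s.length) (b : Int) (hb : ∀ e ∈ s, e < b) :
    ∀ (n : Nat) (a : Int) (c : Int) (lo hi : Option Int),
      (b - a).toNat = n →
      c = (s.countP (fun e => decide (e < a)) : Int) →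
      (lo = some s[k1] ∨ (lo = none ∧ c ≤ (k1 : Int) ∧ a ≤ s[k1])) →
      (hi = some s[k2] ∨ (hi = none ∧ c ≤ (k2 : Int) ∧ a ≤ s[k2])) →
      ((PySem.List.pyRange a b 1).foldl (fun st v =>
          ((st.1 + (s.count v : Int),
            if st.2.1 = none ∧ st.1 + (s.count v : Int) > (k1 : Int) then some v else st.2.1,
            if st.2.2 = none ∧ st.1 + (s.count v : Int) > (k2 : Int) then some v else st.2.2) : Int × Option Int × Option Int)) (c, lo, hi)).2
        = (some s[k1], some s[k2]) := by
  intro n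
  induction n with
  | zero =>
    intro a c lo hi hn hc hlo hhi
    have hba : b ≤ a := by omega
    rw [PySem.List.pyRange_one_eq_nil hba]
    simp only [List.foldl_nil]
    have hlo' : lo = some s[k1] := by
      rcases hlo with h | ⟨_, _, h⟩
      · exact h
      · exact absurd (hb s[k1] (List.getElem_mem hk1)) (by omega)
    have hhi' : hi = some s[k2] := by
      rcases hhi with h | ⟨_, _, h⟩
      · exact h
      · exact absurd (hb s[k2] (List.getElem_mem hk2)) (by omega)
    simp [hlo', hhi']
  | succ n ih =>
    intro a c lo hi hn hc hlo hhi
    have hab : a < b := by omega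
    rw [PySem.List.pyRange_one_cons hab, List.foldl_cons]
    exact ih (a + 1)
      (c + (s.count a : Int))
      (if lo = none ∧ c + (s.count a : Int) > (k1 : Int) then some a else lo)
      (if hi = none ∧ c + (s.count a : Int) > (k2 : Int) then some a else hi)
      (by omega)
      (by rw [hc, countP_lt_add_count s a]; push_cast; ring)
      (slot_step s hs k1 hk1 a c lo hc hlo)
      (slot_step s hs k2 hk2 a c hi hc hhi)

theorem mem_winList (pix : List (Int × Int × Int)) (x y radius w h_ : Int) (e : Int)
    (he : e ∈ winList pix x y radius w h_) : 15 < e ∧ e < 230 := by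
  simp only [winList, List.mem_flatMap] at he
  obtain ⟨i, -, he⟩ := he
  split at he
  · simp at he
  · simp only [List.mem_flatMap] at he
    obtain ⟨j, -, he⟩ := he
    split at he
    · simp at he
    · rcases hg : pixGet? pix i j with _ | v <;> rw [hg] at he
      · simp at he
      · split at he
        · rename_i hf
          simp at he
          omega
        · simp at he

theorem portA_list (pix : List (Int × Int × Int)) (x y radius w h_ : Int) :
    (PySem.List.pyRange (x - radius) (x + radius) 1).foldl (fun acc i =>
      if i < 1 ∨ i > w then acc
      else (PySem.List.pyRange (y - radius) (y + radius) 1).foldl (fun acc j =>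
        if j ≤ 1 ∨ j > h_ then acc
        else if 15 < (pixGet? pix i j).getD 0 ∧ (pixGet? pix i j).getD 0 < 230 then
          acc ++ [(pixGet? pix i j).getD 0]
        else acc) acc) [] = winList pix x y radius w h_ := by
  have hbody : ∀ (acc : List Int) (i : Int),
      (if i < 1 ∨ i > w then acc
       else (PySem.List.pyRange (y - radius) (y + radius) 1).foldl (fun acc j =>
         if j ≤ 1 ∨ j > h_ then acc
         else if 15 < (pixGet? pix i j).getD 0 ∧ (pixGet? pix i j).getD 0 < 230 then
           acc ++ [(pixGet? pix i j).getD 0]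
         else acc) acc)
      = acc ++ (if i < 1 ∨ i > w then []
        else (PySem.List.pyRange (y - radius) (y + radius) 1).flatMap (fun j =>
          if j ≤ 1 ∨ j > h_ then []
          else match pixGet? pix i j with
            | some v => if 15 < v ∧ v < 230 then [v] else []
            | none => [])) := by
    intro acc i
    split
    · simp
    · have hinner : ∀ (acc : List Int) (j : Int),
          (if j ≤ 1 ∨ j > h_ then acc
           else if 15 < (pixGet? pix i j).getD 0 ∧ (pixGet? pix i j).getD 0 < 230 then
             acc ++ [(pixGet? pix i j).getD 0]
           else acc)
          = acc ++ (if j ≤ 1 ∨ j > h_ then []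
            else match pixGet? pix i j with
              | some v => if 15 < v ∧ v < 230 then [v] else []
              | none => []) := by
        intro acc j
        split
        · simp
        · rcases hg : pixGet? pix i j with _ | v
          · simp
          · simp only [Option.getD_some]
            split <;> simp
      calc (PySem.List.pyRange (y - radius) (y + radius) 1).foldl (fun acc j =>
            if j ≤ 1 ∨ j > h_ then acc
            else if 15 < (pixGet? pix i j).getD 0 ∧ (pixGet? pix i j).getD 0 < 230 then
              acc ++ [(pixGet? pix i j).getD 0]
            else acc) acc
          = (PySem.List.pyRange (y - radius) (y + radius) 1).foldl (fun acc j =>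
              acc ++ (if j ≤ 1 ∨ j > h_ then []
                else match pixGet? pix i j with
                  | some v => if 15 < v ∧ v < 230 then [v] else []
                  | none => [])) acc := by
            exact PySem.List.foldl_congr_mem _ _ _ _ (fun acc j _ => hinner acc j)
        _ = _ := by rw [PySem.List.foldl_append_eq_flatMap]
  calc _ = (PySem.List.pyRange (x - radius) (x + radius) 1).foldl (fun acc i =>
        acc ++ (if i < 1 ∨ i > w then []
          else (PySem.List.pyRange (y - radius) (y + radius) 1).flatMap (fun j =>
            if j ≤ 1 ∨ j > h_ then []
            else match pixGet? pix i j with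
              | some v => if 15 < v ∧ v < 230 then [v] else []
              | none => []))) [] := PySem.List.foldl_congr_mem _ _ _ _ (fun acc i _ => hbody acc i)
    _ = winList pix x y radius w h_ := by rw [PySem.List.foldl_append_eq_flatMap]; rfl

theorem foldl_count_len (l : List Int) : ∀ (c : Int), l.foldl (fun n _ => n + 1) c = c + (l.length : Int) := by
  induction l with
  | nil => simp
  | cons x t ih => intro c; simp [List.foldl_cons, ih]; omega

theorem portB_state (pix : List (Int × Int × Int)) (x y radius w h_ : Int) :
    (PySem.List.pyRange (x - radius) (x + radius) 1).foldl (fun st i =>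
      if i < 1 ∨ i > w then st
      else (PySem.List.pyRange (y - radius) (y + radius) 1).foldl (fun st j =>
        if j ≤ 1 ∨ j > h_ then st
        else
          if 15 < (pixGet? pix i j).getD 0 ∧ (pixGet? pix i j).getD 0 < 230 then
            (st.1.modify ((pixGet? pix i j).getD 0) 0 (· + 1), st.2 + 1)
          else st) st)
      ((PySem.Dict.empty : PySem.Dict Int Int), (0 : Int))
    = ((winList pix x y radius w h_).foldl (fun d v => d.modify v 0 (· + 1)) PySem.Dict.empty,
       ((winList pix x y radius w h_).length : Int)) := by
  have hbody : ∀ (st : PySem.Dict Int Int × Int) (i : Int),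
      (if i < 1 ∨ i > w then st
       else (PySem.List.pyRange (y - radius) (y + radius) 1).foldl (fun st j =>
         if j ≤ 1 ∨ j > h_ then st
         else
           let v := (pixGet? pix i j).getD 0
           if 15 < v ∧ v < 230 then (st.1.modify v 0 (· + 1), st.2 + 1) else st) st)
      = ((if i < 1 ∨ i > w then []
          else (PySem.List.pyRange (y - radius) (y + radius) 1).flatMap (fun j =>
            if j ≤ 1 ∨ j > h_ then []
            else match pixGet? pix i j with
              | some v => if 15 < v ∧ v < 230 then [v] else []
              | none => [])).foldl (fun st v => (st.1.modify v 0 (· + 1), st.2 + 1)) st) := by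
    intro st i
    split
    · simp
    · have hinner : ∀ (st : PySem.Dict Int Int × Int) (j : Int),
          (if j ≤ 1 ∨ j > h_ then st
           else
             let v := (pixGet? pix i j).getD 0
             if 15 < v ∧ v < 230 then (st.1.modify v 0 (· + 1), st.2 + 1) else st)
          = ((if j ≤ 1 ∨ j > h_ then []
             else match pixGet? pix i j with
               | some v => if 15 < v ∧ v < 230 then [v] else []
               | none => []).foldl (fun st v => (st.1.modify v 0 (· + 1), st.2 + 1)) st) := by
        intro st j
        split
        · simp
        · rcases hg : pixGet? pix i j with _ | v
          · simp
          · simp only [Option.getD_some]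
            split <;> simp
      calc _ = (PySem.List.pyRange (y - radius) (y + radius) 1).foldl (fun st j =>
              ((if j ≤ 1 ∨ j > h_ then []
               else match pixGet? pix i j with
                 | some v => if 15 < v ∧ v < 230 then [v] else []
                 | none => []).foldl (fun st v => (st.1.modify v 0 (· + 1), st.2 + 1)) st)) st :=
            PySem.List.foldl_congr_mem _ _ _ _ (fun st j _ => hinner st j)
        _ = _ := (List.foldl_flatMap).symm
  calc _ = (PySem.List.pyRange (x - radius) (x + radius) 1).foldl (fun st i =>
        ((if i < 1 ∨ i > w then []
          else (PySem.List.pyRange (y - radius) (y + radius) 1).flatMap (fun j =>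
            if j ≤ 1 ∨ j > h_ then []
            else match pixGet? pix i j with
              | some v => if 15 < v ∧ v < 230 then [v] else []
              | none => [])).foldl (fun st v => (st.1.modify v 0 (· + 1), st.2 + 1)) st))
        ((PySem.Dict.empty : PySem.Dict Int Int), (0 : Int)) :=
      PySem.List.foldl_congr_mem _ _ _ _ (fun st i _ => hbody st i)
    _ = (winList pix x y radius w h_).foldl (fun st v => (st.1.modify v 0 (· + 1), st.2 + 1))
        ((PySem.Dict.empty : PySem.Dict Int Int), (0 : Int)) := by
      rw [← List.foldl_flatMap]; rfl
    _ = _ := by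
      rw [PySem.List.foldl_prod_mk (fun d (v : Int) => PySem.Dict.modify d v 0 (· + 1)) (fun (n : Int) (_ : Int) => n + 1)]
      rw [foldl_count_len]
      simp

theorem ports_eq (pix : List (Int × Int × Int)) (x y radius w h_ : Int) :
    mid_of_rec pix x y radius w h_ = mid_of_rec_alt pix x y radius w h_ := by
  simp only [mid_of_rec, mid_of_rec_alt, portA_list, portB_state]
  have hL : ∀ e ∈ winList pix x y radius w h_, 15 < e ∧ e < 230 :=
    fun e he => mem_winList pix x y radius w h_ e he
  set L := winList pix x y radius w h_ with hLdef
  set ps := PySem.List.sorted L (fun v => v) false with hpsdef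
  have hlen : ps.length = L.length := PySem.List.length_sorted ..
  have hperm : ps.Perm L := PySem.List.sorted_perm ..
  have hsorted : List.Pairwise (· ≤ ·) ps := PySem.List.sorted_pairwise ..
  have hmem : ∀ e ∈ ps, 15 < e ∧ e < 230 := fun e he => hL e (hperm.mem_iff.mp he)
  rw [hlen]
  have hdivA : PySem.Int.floordiv ((L.length : Nat) : Int) 2 = ((L.length / 2 : Nat) : Int) := by
    rw [PySem.Int.floordiv_eq_ediv_of_pos (by omega)]; omega
  by_cases hN : L.length < 2
  · have hA : PySem.Int.floordiv ((L.length : Nat) : Int) 2 ≤ 0 := by rw [hdivA]; omega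
    have hB : ((L.length : Nat) : Int) < 2 := by omega
    rw [if_pos hA, if_pos hB]
  · have hA : ¬ PySem.Int.floordiv ((L.length : Nat) : Int) 2 ≤ 0 := by rw [hdivA]; omega
    have hB : ¬ ((L.length : Nat) : Int) < 2 := by omega
    rw [if_neg hA, if_neg hB]
    set N := L.length with hNdef
    set k1 : Nat := N / 2 with hk1def
    set k2 : Nat := N - N / 2 with hk2def
    have hk1 : k1 < N := by omega
    have hk2 : k2 < N := by omega
    have hk1pos : 0 < k1 := by omega
    rw [hdivA]
    -- rewrite the histogram lookups to counts of ps
    have hcnt : ∀ (st : Int × Option Int × Option Int) (v : Int), v ∈ PySem.List.pyRange 16 230 1 →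
        (fun (st : Int × Option Int × Option Int) v =>
          ((st.1 + (L.foldl (fun d v => d.modify v 0 (· + 1)) PySem.Dict.empty).getD v 0,
            if st.2.1 = none ∧ st.1 + (L.foldl (fun d v => d.modify v 0 (· + 1)) PySem.Dict.empty).getD v 0 > ((k1 : Nat) : Int) then some v else st.2.1,
            if st.2.2 = none ∧ st.1 + (L.foldl (fun d v => d.modify v 0 (· + 1)) PySem.Dict.empty).getD v 0 > ((N : Int) - ((k1 : Nat) : Int)) then some v else st.2.2) : Int × Option Int × Option Int)) st v
        = (fun (st : Int × Option Int × Option Int) v =>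
            ((st.1 + (ps.count v : Int),
              if st.2.1 = none ∧ st.1 + (ps.count v : Int) > ((k1 : Nat) : Int) then some v else st.2.1,
              if st.2.2 = none ∧ st.1 + (ps.count v : Int) > ((k2 : Nat) : Int) then some v else st.2.2) : Int × Option Int × Option Int)) st v := by
      intro st v _
      have h1 : (L.foldl (fun d v => d.modify v 0 (· + 1)) PySem.Dict.empty).getD v 0 = (ps.count v : Int) := by
        rw [PySem.Dict.getD_foldl_modify_add_one, PySem.Dict.getD_empty, hperm.count_eq]
        simp
      have h2 : ((N : Int) - ((k1 : Nat) : Int)) = ((k2 : Nat) : Int) := by omega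
      simp only [h1, h2]
    rw [PySem.List.foldl_congr_mem _ _ _ _ (fun st v hv => hcnt st v hv)]
    have hk1' : k1 < ps.length := by omega
    have hk2' : k2 < ps.length := by omega
    have hczero : (0 : Int) = (ps.countP (fun e => decide (e < 16)) : Int) := by
      rw [List.countP_eq_zero.mpr]
      · simp
      · intro e he
        have := (hmem e he).1
        simp; omega
    have hscan := scan_inv ps hsorted k1 k2 hk1' hk2' 230
      (fun e he => (hmem e he).2) 214 16 0 none none (by decide) hczero
      (Or.inr ⟨rfl, by omega, by have := (hmem _ (List.getElem_mem hk1')).1; omega⟩)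
      (Or.inr ⟨rfl, by omega, by have := (hmem _ (List.getElem_mem hk2')).1; omega⟩)
    have hlo : ((PySem.List.pyRange 16 230 1).foldl (fun st v =>
          ((st.1 + (ps.count v : Int),
            if st.2.1 = none ∧ st.1 + (ps.count v : Int) > ((k1 : Nat) : Int) then some v else st.2.1,
            if st.2.2 = none ∧ st.1 + (ps.count v : Int) > ((k2 : Nat) : Int) then some v else st.2.2) : Int × Option Int × Option Int)) ((0 : Int), none, none)).2.1 = some ps[k1] := by
      rw [hscan]
    have hhi : ((PySem.List.pyRange 16 230 1).foldl (fun st v =>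
          ((st.1 + (ps.count v : Int),
            if st.2.1 = none ∧ st.1 + (ps.count v : Int) > ((k1 : Nat) : Int) then some v else st.2.1,
            if st.2.2 = none ∧ st.1 + (ps.count v : Int) > ((k2 : Nat) : Int) then some v else st.2.2) : Int × Option Int × Option Int)) ((0 : Int), none, none)).2.2 = some ps[k2] := by
      rw [hscan]
    rw [hlo, hhi, Option.getD_some, Option.getD_some]
    rw [PySem.List.pyGetD_natCast, List.getD_eq_getElem ps 0 hk1']
    rw [PySem.List.pyGetD_neg_natCast ps k1 0 hk1pos (by omega)]
    simp only [show ps.length - k1 = k2 from by omega]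

-- ===== VERDICT (by name: the statement is the Claim_ definition above) =====
theorem mid_of_rec_spec : Claim_equal_mid_of_rec := by
  intro pix x y radius w h_ _ _
  exact ports_eq pix x y radius w h_
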